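-- pv_equiv track=rewrite | github.com/pjz2000/sideguy-solutions | tools/cluster-intelligence/cluster_intelligence.py | detect_cluster
-- ===== SOURCE A (Python) =====
-- from collections import defaultdict
--
-- CLUSTER_RULES = {
--     "payments": [
--         "payment", "payments", "merchant", "stripe", "square", "paypal",
--         "processing", "processor", "chargeback", "credit-card", "fees"
--     ],
--     "ai-automation": [
--         "ai", "automation", "automate", "gpt", "chatbot", "workflow",
--         "agent", "agents"
--     ],
--     "contractor": [
--         "contractor", "contractors", "hvac", "plumber", "plumbing",
--         "electrician", "roofing", "landscaping", "solar"
--     ],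
--     "local-business": [
--         "restaurant", "restaurants", "small-business", "local-business",
--         "service-business", "business"
--     ],
--     "software": [
--         "software", "crm", "erp", "platform", "tool", "tools",
--         "scheduling", "dispatch", "billing"
--     ]
-- }
--
-- def detect_cluster(slug):
--     scores = defaultdict(int)
--     for cluster, keywords in CLUSTER_RULES.items():
--         for kw in keywords:
--             if kw in slug:
--                 scores[cluster] += 1
--     if not scores:
--         return "general"
--     return sorted(scores.items(), key=lambda x: (-x[1], x[0]))[0][0]
-- ===== SOURCE B (Python) =====
-- CLUSTER_RULES = {
--     "payments": [
--         "payment", "payments", "merchant", "stripe", "square", "paypal",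
--         "processing", "processor", "chargeback", "credit-card", "fees"
--     ],
--     "ai-automation": [
--         "ai", "automation", "automate", "gpt", "chatbot", "workflow",
--         "agent", "agents"
--     ],
--     "contractor": [
--         "contractor", "contractors", "hvac", "plumber", "plumbing",
--         "electrician", "roofing", "landscaping", "solar"
--     ],
--     "local-business": [
--         "restaurant", "restaurants", "small-business", "local-business",
--         "service-business", "business"
--     ],
--     "software": [
--         "software", "crm", "erp", "platform", "tool", "tools",
--         "scheduling", "dispatch", "billing"
--     ]
-- }
--
-- def detect_cluster(slug):
--     best_score = 0
--     best_name = None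
--     for cluster, keywords in CLUSTER_RULES.items():
--         count = sum(kw in slug for kw in keywords)
--         if count > best_score or (count == best_score
--                                   and best_name is not None
--                                   and cluster < best_name):
--             best_score = count
--             best_name = cluster
--     return best_name if best_name is not None else "general"
-- ===== Notes on version B (the rewrite author's own statement) =====
-- stated objective: simpler
-- what changed: B replaces A's defaultdict score table plus full sort of the items by (-count, name) with a single running-best accumulator (best_score, best_name) updated per cluster, falling back to A's default name when no keyword matched; the per-cluster keyword counting is unchanged.
import Mathlib
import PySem

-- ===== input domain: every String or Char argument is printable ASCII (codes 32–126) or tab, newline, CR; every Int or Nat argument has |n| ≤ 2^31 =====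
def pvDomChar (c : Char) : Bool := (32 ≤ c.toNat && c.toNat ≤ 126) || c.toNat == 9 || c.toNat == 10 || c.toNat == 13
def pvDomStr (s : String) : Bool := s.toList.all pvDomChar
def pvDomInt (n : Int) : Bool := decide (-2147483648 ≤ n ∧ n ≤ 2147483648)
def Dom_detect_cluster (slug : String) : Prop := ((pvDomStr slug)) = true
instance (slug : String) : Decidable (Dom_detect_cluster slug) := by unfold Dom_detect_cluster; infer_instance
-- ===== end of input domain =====

-- B replaces A's score dict + sort-and-take-first by a single running-best accumulator pass
-- (same keyword counting, no intermediate table, no sort); objective: simpler.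

-- shared module constant (CLUSTER_RULES in the Python module, used by both A and B)
def CLUSTER_RULES : List (String × List String) :=
  [("payments", ["payment", "payments", "merchant", "stripe", "square", "paypal",
      "processing", "processor", "chargeback", "credit-card", "fees"]),
   ("ai-automation", ["ai", "automation", "automate", "gpt", "chatbot", "workflow",
      "agent", "agents"]),
   ("contractor", ["contractor", "contractors", "hvac", "plumber", "plumbing",
      "electrician", "roofing", "landscaping", "solar"]),
   ("local-business", ["restaurant", "restaurants", "small-business", "local-business",
      "service-business", "business"]),
   ("software", ["software", "crm", "erp", "platform", "tool", "tools",
      "scheduling", "dispatch", "billing"])]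

-- ===== PORT A =====
def detect_cluster (slug : String) : String :=
  let scores : PySem.Dict String Int :=
    CLUSTER_RULES.foldl (fun scores p =>
      p.2.foldl (fun scores kw =>
        if PySem.Str.isIn kw slug then scores.modify p.1 0 (· + 1) else scores) scores)
      PySem.Dict.empty
  if scores.items = [] then "general"
  else
    -- sorted(scores.items(), key=lambda x: (-x[1], x[0]))[0][0]; string key compared on .toList
    match PySem.List.pyGet?
        (PySem.List.sorted2 scores.items (fun x => -x.2) (fun x => x.1.toList) false) 0 with
    | some x => x.1
    | none => "general"  -- unreachable: guarded by scores ≠ empty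

-- ===== PORT B =====
def detect_cluster_alt (slug : String) : String :=
  let best :=
    CLUSTER_RULES.foldl (fun best p =>
      let count : Int := (p.2.map (fun kw => if PySem.Str.isIn kw slug then (1 : Int) else 0)).sum
      if decide (best.1 < count) ||
         ((count == best.1) && (match best.2 with
                                | some bn => PySem.Chars.strLt p.1.toList bn.toList
                                | none => false)) then (count, some p.1) else best)
      ((0 : Int), (none : Option String))
  match best.2 with
  | some n => n
  | none => "general"

-- ===== PRECONDITION & SPEC =====
def Spec_detect_cluster (slug : String) (out : String) : Prop := out = detect_cluster_alt slug
instance (slug : String) (out : String) : Decidable (Spec_detect_cluster slug out) := by unfold Spec_detect_cluster; infer_instance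

-- ===== CLAIM (what is proved, stated in full; the proofs are below) =====
def Claim_equal_detect_cluster : Prop := ∀ (slug : String), Dom_detect_cluster slug → Spec_detect_cluster slug (detect_cluster slug)

-- ===== LEMMAS AND PROOFS =====

-- the entries A's dict gains from a cluster named c whose keywords matched n times
def entry (c : String) (n : Nat) : List (String × Int) :=
  if n = 0 then [] else [(c, (n : Int))]

lemma entry_zero (c : String) : entry c 0 = [] := rfl

lemma entry_pos (c : String) (n : Nat) (h : n ≠ 0) : entry c n = [(c, (n : Int))] := by
  rw [entry, if_neg h]

lemma modify_loop (l : List String) (c : String) (d : PySem.Dict String Int) (h : l ≠ []) :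
    l.foldl (fun sc _ => sc.modify c 0 (· + 1)) d = d.insert c (d.getD c 0 + l.length) := by
  induction l generalizing d with
  | nil => exact absurd rfl h
  | cons x t ih =>
    simp only [List.foldl_cons]
    rcases eq_or_ne t [] with rfl | ht
    · simp [PySem.Dict.modify]
    · rw [ih _ ht]
      simp [PySem.Dict.modify, PySem.Dict.getD_insert_self, PySem.Dict.insert_insert_self]
      ring_nf

lemma inner_eq (slug : String) (c : String) (kws : List String) (d : PySem.Dict String Int) :
    kws.foldl (fun sc kw => if PySem.Str.isIn kw slug then sc.modify c 0 (· + 1) else sc) d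
      = if kws.countP (fun kw => PySem.Str.isIn kw slug) = 0 then d
        else d.insert c (d.getD c 0 + (kws.countP (fun kw => PySem.Str.isIn kw slug) : Int)) := by
  have h := List.foldl_filter (p := fun kw => PySem.Str.isIn kw slug)
    (f := fun (sc : PySem.Dict String Int) (_ : String) => sc.modify c 0 (· + 1))
    (l := kws) (init := d)
  rw [← h]
  rcases eq_or_ne (kws.filter (fun kw => PySem.Str.isIn kw slug)) [] with hf | hf
  · have h0 : kws.countP (fun kw => PySem.Str.isIn kw slug) = 0 := by
      rw [List.countP_eq_length_filter, hf]; rfl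
    rw [hf, List.foldl_nil, if_pos h0]
  · rw [modify_loop _ _ _ hf]
    rw [List.countP_eq_length_filter]
    rw [if_neg (by simpa using hf)]

lemma step_items (d : PySem.Dict String Int) (c : String) (n : Nat)
    (h : d.contains c = false) :
    (if n = 0 then d else d.insert c (d.getD c 0 + (n : Int))).items = d.items ++ entry c n := by
  rcases Nat.eq_zero_or_pos n with h0 | h0
  · simp [entry, h0]
  · rw [if_neg (by omega), entry, if_neg (by omega),
      PySem.Dict.items_insert_of_not_contains (h := h),
      PySem.Dict.getD_of_not_contains (h := h)]
    simp

-- A's whole score-building loop, characterised: its items are one entry per cluster in rule order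
lemma afold (slug : String) (rules : List (String × List String)) (d : PySem.Dict String Int)
    (hn : (rules.map Prod.fst).Nodup) (hd : ∀ c ∈ rules.map Prod.fst, d.contains c = false) :
    (rules.foldl (fun scores p =>
        p.2.foldl (fun scores kw =>
          if PySem.Str.isIn kw slug then scores.modify p.1 0 (· + 1) else scores) scores)
      d).items
      = d.items ++ rules.flatMap (fun p => entry p.1 (p.2.countP (fun kw => PySem.Str.isIn kw slug))) := by
  induction rules generalizing d with
  | nil => simp
  | cons p rest ih =>
    simp only [List.foldl_cons, List.flatMap_cons]
    have hcd : d.contains p.1 = false := hd _ (by simp)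
    have hn' : (rest.map Prod.fst).Nodup := by simpa using hn.of_cons
    have hd' : ∀ c ∈ rest.map Prod.fst,
        (p.2.foldl (fun scores kw =>
            if PySem.Str.isIn kw slug then scores.modify p.1 0 (· + 1) else scores) d).contains c = false := by
      intro c hc
      have hcmem : c ∈ List.map Prod.fst (p :: rest) := by
        simp only [List.map_cons, List.mem_cons]; exact Or.inr hc
      have hne : c ≠ p.1 := by
        intro h; subst h
        simp only [List.map_cons, List.nodup_cons] at hn
        exact hn.1 hc
      rw [inner_eq]
      split
      · exact hd _ hcmem
      · rw [PySem.Dict.contains_insert]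
        simp [hne, hd _ hcmem]
    rw [ih _ hn' hd', inner_eq, step_items _ _ _ hcd, List.append_assoc]

-- head of an insertion step / of the whole insertion sort
lemma head?_insertBy {α : Type} (before : α → α → Bool) (x : α) (ys : List α) :
    (PySem.List.insertBy before x ys).head?
      = some (match ys.head? with
              | none => x
              | some m => if before x m then x else m) := by
  cases ys with
  | nil => rfl
  | cons y t =>
    simp only [PySem.List.insertBy, List.head?_cons]
    split <;> simp_all

lemma head?_foldl_insertBy {α : Type} (before : α → α → Bool) (l : List α) (init : List α) :
    (l.foldl (fun acc x => PySem.List.insertBy before x acc) init).head?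
      = l.foldl (fun m x =>
          match m with
          | none => some x
          | some b => if before x b then some x else some b) init.head? := by
  induction l generalizing init with
  | nil => rfl
  | cons x t ih =>
    simp only [List.foldl_cons]
    rw [ih, head?_insertBy]
    cases init.head? with
    | none => rfl
    | some b => dsimp only; split <;> rfl

-- the lexicographic (-count, name) comparison Python's tuple sort key induces
def lexBefore (x y : String × Int) : Bool :=
  decide (-x.2 < -y.2) || (!decide (-y.2 < -x.2) && decide (x.1.toList < y.1.toList))

def minStep (m : Option (String × Int)) (x : String × Int) : Option (String × Int) :=
  match m with
  | none => some x
  | some b => if lexBefore x b then some x else some b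

lemma head?_sorted2 (E : List (String × Int)) :
    (PySem.List.sorted2 E (fun x => -x.2) (fun x => x.1.toList) false).head?
      = E.foldl minStep none := by
  rw [show PySem.List.sorted2 E (fun x => -x.2) (fun x => x.1.toList) false
        = E.foldl (fun acc x => PySem.List.insertBy lexBefore x acc) [] from rfl]
  rw [head?_foldl_insertBy]
  simp only [List.head?_nil]
  congr 1
  funext m x
  cases m <;> rfl

-- correspondence between B's (score, name) accumulator and the min-fold over A's entries
def brel (best : Int × Option String) (m : Option (String × Int)) : Prop :=
  match m with
  | none => best = (0, none)
  | some x => best = (x.2, some x.1) ∧ 1 ≤ x.2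

lemma bstep (slug : String) (p : String × List String) (best : Int × Option String)
    (mo : Option (String × Int)) (h : brel best mo) :
    brel ((fun best (p : String × List String) =>
            let count : Int := (p.2.map (fun kw => if PySem.Str.isIn kw slug then (1 : Int) else 0)).sum
            if decide (best.1 < count) ||
               ((count == best.1) && (match best.2 with
                                      | some bn => PySem.Chars.strLt p.1.toList bn.toList
                                      | none => false)) then (count, some p.1) else best) best p)
         ((entry p.1 (p.2.countP (fun kw => PySem.Str.isIn kw slug))).foldl minStep mo) := by
  simp only [PySem.List.sum_map_ite_one_zero]
  rcases Nat.eq_zero_or_pos (p.2.countP (fun kw => PySem.Str.isIn kw slug)) with h0 | h0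
  · rw [h0, entry_zero, List.foldl_nil, Nat.cast_zero]
    cases mo with
    | none =>
      simp only [brel] at h; subst h
      rw [if_neg (by simp)]
      exact rfl
    | some b =>
      obtain ⟨hb, hv⟩ := h; subst hb
      rw [if_neg (by
        simp only [Bool.or_eq_true, Bool.and_eq_true, decide_eq_true_eq, beq_iff_eq]
        rintro (hx | ⟨hx, -⟩) <;> omega)]
      exact ⟨rfl, hv⟩
  · rw [entry_pos _ _ (by omega), List.foldl_cons, List.foldl_nil]
    cases mo with
    | none =>
      simp only [brel] at h; subst h
      have hc : decide ((0 : Int) < ((p.2.countP (fun kw => PySem.Str.isIn kw slug) : Nat) : Int)) = true := by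
        simp only [decide_eq_true_eq]
        exact_mod_cast h0
      rw [show minStep none (p.1, ((p.2.countP (fun kw => PySem.Str.isIn kw slug) : Nat) : Int))
            = some (p.1, ((p.2.countP (fun kw => PySem.Str.isIn kw slug) : Nat) : Int)) from rfl]
      rw [hc, Bool.true_or, if_pos rfl]
      refine ⟨rfl, ?_⟩
      show (1 : Int) ≤ ((p.2.countP (fun kw => PySem.Str.isIn kw slug) : Nat) : Int)
      omega
    | some b =>
      obtain ⟨hb, hv⟩ := h; subst hb
      rw [show minStep (some b) (p.1, ((p.2.countP (fun kw => PySem.Str.isIn kw slug) : Nat) : Int))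
            = if lexBefore (p.1, ((p.2.countP (fun kw => PySem.Str.isIn kw slug) : Nat) : Int)) b
              then some (p.1, ((p.2.countP (fun kw => PySem.Str.isIn kw slug) : Nat) : Int))
              else some b from rfl]
      simp only [lexBefore, PySem.Chars.strLt]
      by_cases hP : p.1.toList < b.1.toList <;>
        simp only [hP, decide_true, decide_false, Bool.and_true, Bool.and_false, Bool.or_false,
          Bool.or_eq_true, decide_eq_true_eq, beq_iff_eq, Bool.not_eq_true',
          decide_eq_false_iff_not] <;>
      split_ifs <;>
        first
          | exact ⟨rfl, by omega⟩
          | exact ⟨rfl, hv⟩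
          | (exfalso; omega)

lemma bfold (slug : String) (rules : List (String × List String))
    (best : Int × Option String) (mo : Option (String × Int)) (h : brel best mo) :
    brel (rules.foldl (fun best p =>
            let count : Int := (p.2.map (fun kw => if PySem.Str.isIn kw slug then (1 : Int) else 0)).sum
            if decide (best.1 < count) ||
               ((count == best.1) && (match best.2 with
                                      | some bn => PySem.Chars.strLt p.1.toList bn.toList
                                      | none => false)) then (count, some p.1) else best) best)
         ((rules.flatMap (fun p => entry p.1 (p.2.countP (fun kw => PySem.Str.isIn kw slug)))).foldl minStep mo) := by
  induction rules generalizing best mo with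
  | nil => simpa using h
  | cons p rest ih =>
    simp only [List.foldl_cons, List.flatMap_cons, List.foldl_append]
    exact ih _ _ (bstep slug p best mo h)

lemma foldl_minStep_some {E : List (String × Int)} {x : String × Int} :
    E.foldl minStep (some x) ≠ none := by
  induction E generalizing x with
  | nil => simp
  | cons y t ih =>
    simp only [List.foldl_cons, minStep]
    split <;> exact ih

lemma foldl_minStep_none_iff (E : List (String × Int)) :
    E.foldl minStep none = none ↔ E = [] := by
  cases E with
  | nil => simp
  | cons y t =>
    simp only [List.foldl_cons]
    constructor
    · intro h; exact absurd h foldl_minStep_some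
    · intro h; exact absurd h (by simp)

-- ===== VERDICT (by name: the statement is the Claim_ definition above) =====
theorem detect_cluster_spec : Claim_equal_detect_cluster := by
  intro slug _
  unfold Spec_detect_cluster
  rw [detect_cluster.eq_def, detect_cluster_alt.eq_def]
  dsimp only
  have hA := afold slug CLUSTER_RULES PySem.Dict.empty (by decide) (by decide)
  have hB := bfold slug CLUSTER_RULES (0, none) none (by simp [brel])
  rw [hA]
  simp only [show (PySem.Dict.empty : PySem.Dict String Int).items = [] from rfl, List.nil_append]
  set E := CLUSTER_RULES.flatMap
    (fun p => entry p.1 (p.2.countP fun kw => PySem.Str.isIn kw slug)) with hE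
  set B := CLUSTER_RULES.foldl (fun best p =>
            let count : Int := (p.2.map (fun kw => if PySem.Str.isIn kw slug then (1 : Int) else 0)).sum
            if decide (best.1 < count) ||
               ((count == best.1) && (match best.2 with
                                      | some bn => PySem.Chars.strLt p.1.toList bn.toList
                                      | none => false)) then (count, some p.1) else best)
    ((0 : Int), (none : Option String)) with hBdef
  cases hm : E.foldl minStep none with
  | none =>
    have hEnil : E = [] := (foldl_minStep_none_iff E).mp hm
    rw [hm] at hB
    have : B = (0, none) := hB
    rw [if_pos hEnil, this]
  | some x =>
    rw [hm] at hB
    obtain ⟨hb, _⟩ := hB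
    have hEne : E ≠ [] := by
      intro h
      rw [(foldl_minStep_none_iff E).mpr h] at hm
      exact absurd hm (by simp)
    rw [if_neg hEne]
    have hhead : (PySem.List.sorted2 E (fun x => -x.2) (fun x => x.1.toList) false).head? = some x := by
      rw [head?_sorted2, hm]
    obtain ⟨h0, t, hS⟩ : ∃ h0 t, PySem.List.sorted2 E (fun x => -x.2) (fun x => x.1.toList) false = h0 :: t := by
      rcases hSS : PySem.List.sorted2 E (fun x => -x.2) (fun x => x.1.toList) false with _ | ⟨h0, t⟩
      · rw [hSS] at hhead; exact absurd hhead (by simp)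
      · exact ⟨h0, t, rfl⟩
    rw [hS] at hhead ⊢
    simp only [List.head?_cons, Option.some.injEq] at hhead
    subst hhead
    have hget : PySem.List.pyGet? (h0 :: t) (0 : Int) = some h0 := by
      simp [PySem.List.pyGet?, PySem.List.pyIdx?]
    rw [hget, hb]
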